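-- pv_equiv track=rewrite | github.com/krummja/GraphCompiler | graph_compiler/regex_parsing.py | check_prefixes
-- ===== SOURCE A (Python) =====
-- from enum import Enum
--
-- class Relation(str, Enum):
--     SUPERSET = "superset"
--     SUBSET = "subset"
--     INTERSECT = "intersect"
--     DISJOINT = "disjoint"
--     EQUAL = "equal"
--
-- def check_prefixes(lhs: str, rhs: str) -> Relation | None:
--     for idx in range(len(lhs)):
--         if idx == len(rhs):
--             break
--         if lhs[idx] in '(.[' or rhs[idx] in '(.[)':
--             break
--         if lhs[idx] != rhs[idx]:
--             return Relation.DISJOINT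
-- ===== SOURCE B (Python) =====
-- from enum import Enum
--
-- class Relation(str, Enum):
--     SUPERSET = "superset"
--     SUBSET = "subset"
--     INTERSECT = "intersect"
--     DISJOINT = "disjoint"
--     EQUAL = "equal"
--
-- def _first_special(s: str, specials: str) -> int:
--     for i, c in enumerate(s):
--         if c in specials:
--             return i
--     return len(s)
--
-- def check_prefixes(lhs: str, rhs: str) -> Relation | None:
--     L = min(len(lhs), len(rhs), _first_special(lhs, '(.['), _first_special(rhs, '(.[)'))
--     if lhs[:L] != rhs[:L]:
--         return Relation.DISJOINT
--     return None
-- ===== Notes on version B (the rewrite author's own statement) =====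
-- stated objective: alternative
-- what changed: Replaced the interleaved break-and-compare index loop with a two-phase shape: first compute the cut length L as the min of both lengths and each string's first special-character index, then compare the two L-prefixes for inequality.
import Mathlib
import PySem

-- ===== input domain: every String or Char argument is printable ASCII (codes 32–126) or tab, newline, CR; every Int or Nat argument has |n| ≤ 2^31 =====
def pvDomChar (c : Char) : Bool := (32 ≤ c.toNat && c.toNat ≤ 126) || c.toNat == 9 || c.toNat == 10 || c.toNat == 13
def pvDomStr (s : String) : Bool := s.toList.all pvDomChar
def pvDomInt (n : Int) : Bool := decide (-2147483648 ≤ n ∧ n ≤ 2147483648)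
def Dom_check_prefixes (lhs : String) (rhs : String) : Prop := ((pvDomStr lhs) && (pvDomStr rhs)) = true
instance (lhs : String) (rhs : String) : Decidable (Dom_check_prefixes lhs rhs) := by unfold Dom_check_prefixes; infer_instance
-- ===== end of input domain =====

-- B replaces A's interleaved break-and-compare loop by a two-phase shape: find the cut length L
-- (min of lengths and first special-char indices), then compare the two L-prefixes (objective: alternative).


-- ===== PORT A =====
-- A's loop over idx walks both strings in step: break at end of rhs, break at a special
-- char (lhs vs "(.[", rhs vs "(.[)"), return "disjoint" at the first mismatch.
def checkLoopA : List Char → List Char → Option String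
  | [], _ => none                  -- range(len(lhs)) exhausted
  | _ :: _, [] => none             -- idx == len(rhs): break
  | a :: as, b :: bs =>
    if a ∈ ['(', '.', '['] || b ∈ ['(', '.', '[', ')'] then none
    else if a ≠ b then some "disjoint"
    else checkLoopA as bs

def check_prefixes (lhs : String) (rhs : String) : Option String :=
  checkLoopA lhs.toList rhs.toList

-- ===== PORT B =====
-- first index of a char of `specials` in s; len(s) if none
def firstSpecial (s : List Char) (specials : List Char) : Nat :=
  match s with
  | [] => 0
  | c :: cs => if c ∈ specials then 0 else firstSpecial cs specials + 1

def check_prefixes_alt (lhs : String) (rhs : String) : Option String :=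
  let L := min (min lhs.toList.length rhs.toList.length)
               (min (firstSpecial lhs.toList ['(', '.', '['])
                    (firstSpecial rhs.toList ['(', '.', '[', ')']))
  if lhs.toList.take L ≠ rhs.toList.take L then some "disjoint" else none

-- ===== PRECONDITION & SPEC =====
def Spec_check_prefixes (lhs : String) (rhs : String) (out : Option String) : Prop := out = check_prefixes_alt lhs rhs
instance (lhs : String) (rhs : String) (out : Option String) : Decidable (Spec_check_prefixes lhs rhs out) := by unfold Spec_check_prefixes; infer_instance

-- ===== CLAIM (what is proved, stated in full; the proofs are below) =====
def Claim_equal_check_prefixes : Prop := ∀ (lhs : String) (rhs : String), Dom_check_prefixes lhs rhs → Spec_check_prefixes lhs rhs (check_prefixes lhs rhs)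

-- ===== LEMMAS AND PROOFS =====

def altList (l r : List Char) : Option String :=
  let L := min (min l.length r.length)
               (min (firstSpecial l ['(', '.', '[']) (firstSpecial r ['(', '.', '[', ')']))
  if l.take L ≠ r.take L then some "disjoint" else none

theorem checkLoopA_eq_altList : ∀ (l r : List Char), checkLoopA l r = altList l r := by
  intro l
  induction l with
  | nil => intro r; cases r <;> simp [checkLoopA, altList]
  | cons a as ih =>
    intro r
    cases r with
    | nil => simp [checkLoopA, altList]
    | cons b bs =>
      by_cases hs : a ∈ ['(', '.', '['] ∨ b ∈ ['(', '.', '[', ')']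
      · rcases hs with h | h <;> simp [checkLoopA, altList, firstSpecial, h]
      · rw [not_or] at hs
        obtain ⟨h1, h2⟩ := hs
        have hL : (min (min (a :: as).length (b :: bs).length)
            (min (firstSpecial (a :: as) ['(', '.', '['])
                 (firstSpecial (b :: bs) ['(', '.', '[', ')']))) =
            (min (min as.length bs.length)
            (min (firstSpecial as ['(', '.', '[']) (firstSpecial bs ['(', '.', '[', ')']))) + 1 := by
          simp [firstSpecial, h1, h2]
        by_cases hab : a = b
        · subst hab
          simp only [checkLoopA, altList, hL]
          simp [h1, h2]
          have := ih bs
          simp [altList] at this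
          simpa using this
        · simp only [checkLoopA, altList, hL]
          simp [h1, h2, hab, List.take_succ_cons]

-- ===== VERDICT (by name: the statement is the Claim_ definition above) =====
theorem check_prefixes_spec : Claim_equal_check_prefixes := by
  intro lhs rhs _
  unfold Spec_check_prefixes check_prefixes check_prefixes_alt
  rw [checkLoopA_eq_altList]
  rfl
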